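-- pv_equiv track=rewrite | github.com/mark-oskin/pyshell | pyshell/parser.py | has_conditional
-- ===== SOURCE A (Python) =====
-- def has_conditional(line: str) -> bool:
--     """True if line contains unquoted && or ||."""
--     quote: str | None = None
--     i = 0
--     n = len(line)
--     while i < n:
--         c = line[i]
--         if quote:
--             if c == quote:
--                 quote = None
--             i += 1
--             continue
--         if c in ("'", '"'):
--             quote = c
--             i += 1
--             continue
--         if i + 1 < n and line[i : i + 2] == "&&":
--             return True
--         if i + 1 < n and line[i : i + 2] == "||":
--             return True
--         i += 1
--     return False
-- ===== SOURCE B (Python) =====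
-- def has_conditional(line: str) -> bool:
--     """True if line contains unquoted && or ||."""
--     masked = []
--     quote = None
--     for c in line:
--         if quote:
--             if c == quote:
--                 quote = None
--             masked.append(' ')
--         elif c in ("'", '"'):
--             quote = c
--             masked.append(' ')
--         else:
--             masked.append(c)
--     m = ''.join(masked)
--     return '&&' in m or '||' in m
-- ===== Notes on version B (the rewrite author's own statement) =====
-- stated objective: faster
-- what changed: Replaces A's inline index loop with per-position look-ahead slice checks by a two-phase pass: blank out quoted spans position-preservingly, then one plain substring search for each operator digraph in the masked string (the tight C-level search loop is what a timing run measures).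
import Mathlib
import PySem

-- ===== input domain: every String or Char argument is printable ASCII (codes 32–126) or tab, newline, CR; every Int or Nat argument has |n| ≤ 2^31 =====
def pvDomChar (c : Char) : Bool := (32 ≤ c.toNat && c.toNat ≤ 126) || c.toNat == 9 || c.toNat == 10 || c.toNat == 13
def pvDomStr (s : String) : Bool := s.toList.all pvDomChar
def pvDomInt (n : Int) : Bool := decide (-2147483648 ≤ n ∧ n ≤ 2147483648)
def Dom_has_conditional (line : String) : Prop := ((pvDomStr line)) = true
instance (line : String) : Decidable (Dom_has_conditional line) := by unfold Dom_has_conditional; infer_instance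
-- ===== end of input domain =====

-- B replaces A's inline look-ahead scan by a two-phase pass: blank out quoted spans
-- position-preservingly, then a plain substring search for "&&"/"||" (objective: simpler).

-- ===== PORT A =====
-- A's while-loop over i with quote state, ported as structural recursion over the
-- remaining characters (the look-ahead line[i:i+2] is the two-element pattern match).
def hcGoA : Option Char → List Char → Bool
  | _, [] => false
  | some q, c :: rest => if c = q then hcGoA none rest else hcGoA (some q) rest
  | none, c :: rest =>
      if c = '\'' ∨ c = '"' then hcGoA (some c) rest
      else match rest with
        | [] => false
        | d :: _ =>
            if c = '&' ∧ d = '&' then true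
            else if c = '|' ∧ d = '|' then true
            else hcGoA none rest

def has_conditional (line : String) : Bool := hcGoA none line.toList

-- ===== PORT B =====
-- Source B's masking loop: same quote-state automaton, but it only BUILDS the masked string.
def maskGoB : Option Char → List Char → List Char
  | _, [] => []
  | some q, c :: rest => ' ' :: maskGoB (if c = q then none else some q) rest
  | none, c :: rest =>
      if c = '\'' ∨ c = '"' then ' ' :: maskGoB (some c) rest
      else c :: maskGoB none rest

def has_conditional_alt (line : String) : Bool :=
  let m := maskGoB none line.toList
  PySem.Chars.isIn ['&', '&'] m || PySem.Chars.isIn ['|', '|'] m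

-- ===== PRECONDITION & SPEC =====
def Spec_has_conditional (line : String) (out : Bool) : Prop := out = has_conditional_alt line
instance (line : String) (out : Bool) : Decidable (Spec_has_conditional line out) := by unfold Spec_has_conditional; infer_instance

-- ===== CLAIM (what is proved, stated in full; the proofs are below) =====
def Claim_equal_has_conditional : Prop := ∀ (line : String), Dom_has_conditional line → Spec_has_conditional line (has_conditional line)

-- ===== LEMMAS AND PROOFS =====

-- a doubled-character pattern is a prefix of c :: m iff c matches and m starts with it too
theorem pair_prefix_iff (a c : Char) (m : List Char) :
    ([a, a] <+: c :: m) ↔ (c = a ∧ m.head? = some a) := by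
  constructor
  · rintro ⟨t, ht⟩
    cases m with
    | nil => simp at ht
    | cons d r =>
      simp only [List.cons_append, List.cons.injEq] at ht
      exact ⟨ht.1.symm, by simp [ht.2.1]⟩
  · rintro ⟨rfl, hh⟩
    cases m with
    | nil => simp at hh
    | cons d r =>
      simp only [List.head?_cons, Option.some.injEq] at hh
      exact ⟨r, by simp [hh]⟩

-- substring search for a doubled character steps over a head where no match starts
theorem isIn_pair_cons (a c : Char) (m : List Char) (h : ¬ ([a, a] <+: c :: m)) :
    PySem.Chars.isIn [a, a] (c :: m) = PySem.Chars.isIn [a, a] m := by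
  cases hb : PySem.Chars.isIn [a, a] m
  · rw [PySem.Chars.isIn_eq_false_iff] at hb ⊢
    intro hi
    rcases List.infix_cons_iff.mp hi with hp | hi'
    · exact h hp
    · exact hb hi'
  · rw [PySem.Chars.isIn_iff_infix] at hb ⊢
    exact hb.trans (List.suffix_cons c m).isInfix

-- a match at the front makes the search succeed
theorem isIn_pair_front (a : Char) (m : List Char) (hh : m.head? = some a) :
    PySem.Chars.isIn [a, a] (a :: m) = true := by
  rw [PySem.Chars.isIn_iff_infix]
  cases m with
  | nil => simp at hh
  | cons d r =>
    simp only [List.head?_cons, Option.some.injEq] at hh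
    exact ⟨[], r, by simp [hh]⟩

-- head of the masked tail in the unquoted state: quotes become blanks, other chars stay
theorem maskGoB_head (rest : List Char) :
    (maskGoB none rest).head? =
      rest.head?.map (fun d => if d = '\'' ∨ d = '"' then ' ' else d) := by
  cases rest with
  | nil => rfl
  | cons d r =>
    by_cases h : d = '\'' ∨ d = '"' <;> simp [maskGoB, h]

-- main invariant: A's scan from state q answers exactly whether "&&" or "||"
-- occurs in the mask of the rest built from the same state
theorem hcGoA_eq_mask (cs : List Char) : ∀ q : Option Char,
    hcGoA q cs = (PySem.Chars.isIn ['&', '&'] (maskGoB q cs)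
      || PySem.Chars.isIn ['|', '|'] (maskGoB q cs)) := by
  induction cs with
  | nil =>
    intro q
    have h1 : PySem.Chars.isIn ['&', '&'] (maskGoB q []) = false := by
      rw [PySem.Chars.isIn_eq_false_iff]; simp [maskGoB]
    have h2 : PySem.Chars.isIn ['|', '|'] (maskGoB q []) = false := by
      rw [PySem.Chars.isIn_eq_false_iff]; simp [maskGoB]
    simp [hcGoA, h1, h2]
  | cons c rest ih =>
    intro q
    have blankstep : ∀ m : List Char,
        (PySem.Chars.isIn ['&', '&'] (' ' :: m) || PySem.Chars.isIn ['|', '|'] (' ' :: m))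
          = (PySem.Chars.isIn ['&', '&'] m || PySem.Chars.isIn ['|', '|'] m) := by
      intro m
      rw [isIn_pair_cons _ _ _ (by rw [pair_prefix_iff]; rintro ⟨h, -⟩; exact absurd h (by decide)),
          isIn_pair_cons _ _ _ (by rw [pair_prefix_iff]; rintro ⟨h, -⟩; exact absurd h (by decide))]
    cases q with
    | some qc =>
      by_cases hq : c = qc
      · simp only [hcGoA, maskGoB, hq, blankstep]
        exact ih none
      · simp only [hcGoA, maskGoB, if_neg hq, blankstep]
        exact ih (some qc)
    | none =>
      by_cases hcq : c = '\'' ∨ c = '"'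
      · simp only [hcGoA, maskGoB, if_pos hcq, blankstep]
        exact ih (some c)
      · simp only [hcGoA, maskGoB, if_neg hcq]
        cases rest with
        | nil =>
          have h1 : PySem.Chars.isIn ['&', '&'] [c] = false := by
            rw [PySem.Chars.isIn_eq_false_iff, List.infix_cons_iff, pair_prefix_iff]
            simp
          have h2 : PySem.Chars.isIn ['|', '|'] [c] = false := by
            rw [PySem.Chars.isIn_eq_false_iff, List.infix_cons_iff, pair_prefix_iff]
            simp
          simp [maskGoB, h1, h2]
        | cons d r =>
          have hch : (maskGoB none (d :: r)).head? =
              some (if d = '\'' ∨ d = '"' then ' ' else d) := by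
            rw [maskGoB_head]; rfl
          by_cases h1 : c = '&' ∧ d = '&'
          · obtain ⟨rfl, rfl⟩ := h1
            have hmk : PySem.Chars.isIn ['&', '&'] ('&' :: maskGoB none ('&' :: r)) = true := by
              apply isIn_pair_front
              rw [hch]; decide
            simp [hmk]
          · by_cases h2 : c = '|' ∧ d = '|'
            · obtain ⟨rfl, rfl⟩ := h2
              have hmk : PySem.Chars.isIn ['|', '|'] ('|' :: maskGoB none ('|' :: r)) = true := by
                apply isIn_pair_front
                rw [hch]; decide
              simp [hmk]
            · have nop : ∀ a : Char, a ≠ ' ' → ¬ (c = a ∧ d = a) →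
                  ¬ ([a, a] <+: c :: maskGoB none (d :: r)) := by
                intro a ha hne hp
                rw [pair_prefix_iff, hch] at hp
                obtain ⟨rfl, hh⟩ := hp
                rw [Option.some.injEq] at hh
                by_cases hdq : d = '\'' ∨ d = '"'
                · rw [if_pos hdq] at hh; exact ha hh.symm
                · rw [if_neg hdq] at hh; exact hne ⟨rfl, hh⟩
              rw [isIn_pair_cons _ _ _ (nop '&' (by decide) h1),
                  isIn_pair_cons _ _ _ (nop '|' (by decide) h2)]
              simp only [h1, h2, ite_false]
              exact ih none

-- ===== VERDICT (by name: the statement is the Claim_ definition above) =====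
theorem has_conditional_spec : Claim_equal_has_conditional := by
  intro line _
  unfold Spec_has_conditional has_conditional has_conditional_alt
  exact hcGoA_eq_mask line.toList none
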